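-- pv_equiv track=rewrite | github.com/jbigorra/advent-of-code-2022 | src/calorie_counter.py | find_highest_calories_count
-- ===== SOURCE A (Python) =====
-- from typing import List
--
-- def find_highest_calories_count(calories: List[int]) -> int:
--     highest_count = [0, 0, 0]
--     counter = 0
--
--     for i, calorie in enumerate(calories):
--         counter += calorie
--
--         if calorie == 0 or i == (len(calories) - 1):
--             if counter >= highest_count[0]:
--                 highest_count[2] = highest_count[1]
--                 highest_count[1] = highest_count[0]
--                 highest_count[0] = counter
--             elif counter >= highest_count[1]:
--                 highest_count[2] = highest_count[1]
--                 highest_count[1] = counter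
--             elif counter >= highest_count[2]:
--                 highest_count[2] = counter
--
--             counter = 0
--
--     return sum(highest_count)
-- ===== SOURCE B (Python) =====
-- def find_highest_calories_count(calories):
--     groups = []
--     counter = 0
--     for i, calorie in enumerate(calories):
--         counter += calorie
--         if calorie == 0 or i == len(calories) - 1:
--             groups.append(counter)
--             counter = 0
--     return sum(sorted(groups + [0, 0, 0], reverse=True)[:3])
-- ===== Notes on version B (the rewrite author's own statement) =====
-- stated objective: idiomatic
-- what changed: B collects the group sums in one pass and then sums the three largest of the padded group list via sorted(..., reverse=True)[:3], replacing A's hand-maintained three-slot insertion cascade.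
import Mathlib
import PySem

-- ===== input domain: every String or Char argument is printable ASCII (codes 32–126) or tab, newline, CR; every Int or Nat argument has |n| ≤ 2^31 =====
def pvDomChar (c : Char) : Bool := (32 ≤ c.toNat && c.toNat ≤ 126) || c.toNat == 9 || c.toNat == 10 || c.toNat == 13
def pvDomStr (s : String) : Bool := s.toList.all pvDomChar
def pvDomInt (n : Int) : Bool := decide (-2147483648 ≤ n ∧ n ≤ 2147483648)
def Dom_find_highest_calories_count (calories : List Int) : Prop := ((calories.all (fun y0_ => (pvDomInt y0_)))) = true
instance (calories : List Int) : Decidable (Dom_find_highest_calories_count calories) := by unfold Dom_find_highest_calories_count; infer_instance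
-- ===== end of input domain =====

-- B replaces A's hand-maintained three-slot insertion cascade by collecting the group sums
-- and summing the three largest of the padded group list (objective: idiomatic).

-- ===== PORT A =====
-- A's `for i, calorie in enumerate(calories)` loop, ported as a foldl over
-- PySem.List.enumerate carrying the state (counter, highest_count-triple).
def find_highest_calories_count (calories : List Int) : Int :=
  let res := (PySem.List.enumerate calories 0).foldl
    (fun (st : Int × (Int × Int × Int)) (p : Int × Int) =>
      let counter := st.1 + p.2
      if p.2 = 0 ∨ p.1 = (calories.length : Int) - 1 then
        (0, if counter ≥ st.2.1 then (counter, st.2.1, st.2.2.1)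
            else if counter ≥ st.2.2.1 then (st.2.1, counter, st.2.2.1)
            else if counter ≥ st.2.2.2 then (st.2.1, st.2.2.1, counter)
            else st.2)
      else (counter, st.2)) (0, (0, 0, 0))
  res.2.1 + res.2.2.1 + res.2.2.2

-- ===== PORT B =====
-- B's group-collecting loop (same flush condition, state (counter, groups)), then
-- sum(sorted(groups + [0, 0, 0], reverse=True)[:3]).
def find_highest_calories_count_alt (calories : List Int) : Int :=
  let res := (PySem.List.enumerate calories 0).foldl
    (fun (st : Int × List Int) (p : Int × Int) =>
      let counter := st.1 + p.2
      if p.2 = 0 ∨ p.1 = (calories.length : Int) - 1 then (0, st.2 ++ [counter])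
      else (counter, st.2)) (0, [])
  ((PySem.List.sorted (res.2 ++ [0, 0, 0]) (fun x => x) true).take 3).sum

-- ===== PRECONDITION & SPEC =====
def Spec_find_highest_calories_count (calories : List Int) (out : Int) : Prop := out = find_highest_calories_count_alt calories
instance (calories : List Int) (out : Int) : Decidable (Spec_find_highest_calories_count calories out) := by unfold Spec_find_highest_calories_count; infer_instance

-- ===== CLAIM (what is proved, stated in full; the proofs are below) =====
def Claim_equal_find_highest_calories_count : Prop := ∀ (calories : List Int), Dom_find_highest_calories_count calories → Spec_find_highest_calories_count calories (find_highest_calories_count calories)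

-- ===== LEMMAS AND PROOFS =====

-- Proof-side recursive views of the two loops ("is last index" = "tail is empty").
def fhcA_go : List Int → Int → Int × Int × Int → Int
  | [], _, t => t.1 + t.2.1 + t.2.2
  | x :: xs, counter, t =>
    let counter := counter + x
    if x = 0 ∨ xs = [] then
      fhcA_go xs 0
        (if counter ≥ t.1 then (counter, t.1, t.2.1)
         else if counter ≥ t.2.1 then (t.1, counter, t.2.1)
         else if counter ≥ t.2.2 then (t.1, t.2.1, counter)
         else t)
    else fhcA_go xs counter t

def fhcB_groups : List Int → Int → List Int
  | [], _ => []
  | x :: xs, counter =>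
    let counter := counter + x
    if x = 0 ∨ xs = [] then counter :: fhcB_groups xs 0
    else fhcB_groups xs counter

-- The enumerate-foldl of port A computes the recursive view (index s carries
-- the invariant s + |xs| = L, so "i = L - 1" is "the tail is empty").
theorem foldA_eq (L : Int) (xs : List Int) : ∀ (s counter : Int) (t : Int × Int × Int),
    s + (xs.length : Int) = L →
    (let res := (PySem.List.enumerate xs s).foldl
      (fun (st : Int × (Int × Int × Int)) (p : Int × Int) =>
        let counter := st.1 + p.2
        if p.2 = 0 ∨ p.1 = L - 1 then
          (0, if counter ≥ st.2.1 then (counter, st.2.1, st.2.2.1)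
              else if counter ≥ st.2.2.1 then (st.2.1, counter, st.2.2.1)
              else if counter ≥ st.2.2.2 then (st.2.1, st.2.2.1, counter)
              else st.2)
        else (counter, st.2)) (counter, t)
     res.2.1 + res.2.2.1 + res.2.2.2) = fhcA_go xs counter t := by
  induction xs with
  | nil => intro s counter t _; rfl
  | cons x xs ih =>
    intro s counter t hs
    have hlen : (s + 1) + (xs.length : Int) = L := by
      rw [List.length_cons] at hs; push_cast at hs ⊢; omega
    have hlast : (s = L - 1) ↔ xs = [] := by
      rw [List.length_cons] at hs
      push_cast at hs
      constructor
      · intro h; rw [← List.length_eq_zero_iff]; omega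
      · intro h; subst h; simp at hs ⊢; omega
    have hcond : (x = 0 ∨ s = L - 1) = (x = 0 ∨ xs = []) := by
      rw [hlast]
    rw [PySem.List.enumerate_cons]
    simp only [List.foldl_cons]
    by_cases hx : x = 0 ∨ xs = []
    · rw [show fhcA_go (x :: xs) counter t = fhcA_go xs 0
            (if counter + x ≥ t.1 then (counter + x, t.1, t.2.1)
             else if counter + x ≥ t.2.1 then (t.1, counter + x, t.2.1)
             else if counter + x ≥ t.2.2 then (t.1, t.2.1, counter + x)
             else t) from by simp [fhcA_go, hx]]
      rw [← ih (s + 1) 0 _ hlen]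
      simp only [hcond, if_pos hx]
    · rw [show fhcA_go (x :: xs) counter t = fhcA_go xs (counter + x) t from by
        simp [fhcA_go, hx]]
      rw [← ih (s + 1) (counter + x) t hlen]
      simp only [hcond, if_neg hx]

-- The enumerate-foldl of port B collects exactly the recursive group list.
theorem foldB_eq (L : Int) (xs : List Int) : ∀ (s counter : Int) (acc : List Int),
    s + (xs.length : Int) = L →
    ((PySem.List.enumerate xs s).foldl
      (fun (st : Int × List Int) (p : Int × Int) =>
        let counter := st.1 + p.2
        if p.2 = 0 ∨ p.1 = L - 1 then (0, st.2 ++ [counter])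
        else (counter, st.2)) (counter, acc)).2 = acc ++ fhcB_groups xs counter := by
  induction xs with
  | nil => intro s counter acc _; simp [fhcB_groups]
  | cons x xs ih =>
    intro s counter acc hs
    have hlast : (s = L - 1) ↔ xs = [] := by
      rw [List.length_cons] at hs
      push_cast at hs
      constructor
      · intro h; rw [← List.length_eq_zero_iff]; omega
      · intro h; subst h; simp at hs ⊢; omega
    have hcond : (x = 0 ∨ s = L - 1) = (x = 0 ∨ xs = []) := by
      rw [hlast]
    rw [PySem.List.enumerate_cons]
    simp only [List.foldl_cons]
    by_cases hx : x = 0 ∨ xs = []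
    · rw [show fhcB_groups (x :: xs) counter = (counter + x) :: fhcB_groups xs 0 from by
        simp only [fhcB_groups, if_pos hx]]
      simp only [hcond, if_pos hx]
      rw [ih (s + 1) 0 _ (by rw [List.length_cons] at hs; push_cast at hs ⊢; omega)]
      simp
    · rw [show fhcB_groups (x :: xs) counter = fhcB_groups xs (counter + x) from by
        simp only [fhcB_groups, if_neg hx]]
      simp only [hcond, if_neg hx]
      exact ih (s + 1) (counter + x) acc (by rw [List.length_cons] at hs; push_cast at hs ⊢; omega)

-- A's per-group insertion step, abstracted from fhcA_go.
def fhcStep : Int × Int × Int → Int → Int × Int × Int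
  | (a, b, c), g =>
    if g ≥ a then (g, a, b)
    else if g ≥ b then (a, g, b)
    else if g ≥ c then (a, b, g)
    else (a, b, c)

-- A's loop equals folding the insertion step over B's group list.
theorem fhcA_go_eq_foldl (xs : List Int) : ∀ (counter : Int) (t : Int × Int × Int),
    fhcA_go xs counter t = (let (a, b, c) := List.foldl fhcStep t (fhcB_groups xs counter); a + b + c) := by
  induction xs with
  | nil => intro counter ⟨a, b, c⟩; simp [fhcA_go, fhcB_groups]
  | cons x xs ih =>
    intro counter ⟨a, b, c⟩
    simp only [fhcA_go, fhcB_groups]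
    by_cases h : x = 0 ∨ xs = []
    · simp only [if_pos h, List.foldl_cons, ih]
      rfl
    · simp only [if_neg h, ih]

-- Invariant: the folded triple is sorted descending and, together with some residue
-- `rest` of smaller elements, is a permutation of the initial material plus the groups.
theorem fhcStep_foldl_inv (gs : List Int) : ∀ (a b c : Int) (rest : List Int),
    b ≤ a → c ≤ b → (∀ y ∈ rest, y ≤ c) →
    ∃ a' b' c' rest', List.foldl fhcStep (a, b, c) gs = (a', b', c') ∧
      b' ≤ a' ∧ c' ≤ b' ∧ (∀ y ∈ rest', y ≤ c') ∧
      (a' :: b' :: c' :: rest').Perm ((a :: b :: c :: rest) ++ gs) := by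
  induction gs with
  | nil =>
    intro a b c rest hba hcb hrest
    exact ⟨a, b, c, rest, rfl, hba, hcb, hrest, by simp⟩
  | cons g gs ih =>
    intro a b c rest hba hcb hrest
    simp only [List.foldl_cons]
    have hmid : ((a :: b :: c :: rest) ++ g :: gs).Perm (g :: ((a :: b :: c :: rest) ++ gs)) :=
      List.perm_middle
    by_cases h1 : a ≤ g
    · have hstep : fhcStep (a, b, c) g = (g, a, b) := by simp [fhcStep, h1]
      rw [hstep]
      obtain ⟨a', b', c', rest', heq, h1', h2', h3', hperm⟩ :=
        ih g a b (c :: rest) h1 hba (fun y hy => by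
          rcases List.mem_cons.mp hy with rfl | hy
          · exact hcb
          · exact le_trans (hrest y hy) hcb)
      refine ⟨a', b', c', rest', heq, h1', h2', h3', ?_⟩
      exact hperm.trans hmid.symm
    · by_cases h2 : b ≤ g
      · have hstep : fhcStep (a, b, c) g = (a, g, b) := by
          simp [fhcStep, h2, h1]
        rw [hstep]
        obtain ⟨a', b', c', rest', heq, h1', h2', h3', hperm⟩ :=
          ih a g b (c :: rest) ((not_le.mp h1).le) h2 (fun y hy => by
            rcases List.mem_cons.mp hy with rfl | hy
            · exact hcb
            · exact le_trans (hrest y hy) hcb)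
        refine ⟨a', b', c', rest', heq, h1', h2', h3', ?_⟩
        have hY : (a :: g :: b :: c :: rest).Perm (g :: a :: b :: c :: rest) :=
          List.perm_middle (l₁ := [a]) (l₂ := b :: c :: rest)
        exact (hperm.trans (hY.append_right gs)).trans hmid.symm
      · by_cases h3 : c ≤ g
        · have hstep : fhcStep (a, b, c) g = (a, b, g) := by
            simp [fhcStep, h3, h1, h2]
          rw [hstep]
          obtain ⟨a', b', c', rest', heq, h1', h2', h3', hperm⟩ :=
            ih a b g (c :: rest) hba ((not_le.mp h2).le) (fun y hy => by
              rcases List.mem_cons.mp hy with rfl | hy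
              · exact h3
              · exact le_trans (hrest y hy) h3)
          refine ⟨a', b', c', rest', heq, h1', h2', h3', ?_⟩
          have hY : (a :: b :: g :: c :: rest).Perm (g :: a :: b :: c :: rest) :=
            List.perm_middle (l₁ := [a, b]) (l₂ := c :: rest)
          exact (hperm.trans (hY.append_right gs)).trans hmid.symm
        · have hstep : fhcStep (a, b, c) g = (a, b, c) := by
            simp [fhcStep, h1, h2, h3]
          rw [hstep]
          obtain ⟨a', b', c', rest', heq, h1', h2', h3', hperm⟩ :=
            ih a b c (g :: rest) hba hcb (fun y hy => by
              rcases List.mem_cons.mp hy with rfl | hy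
              · exact (not_le.mp h3).le
              · exact hrest y hy)
          refine ⟨a', b', c', rest', heq, h1', h2', h3', ?_⟩
          have hY : (a :: b :: c :: g :: rest).Perm (g :: a :: b :: c :: rest) :=
            List.perm_middle (l₁ := [a, b, c]) (l₂ := rest)
          exact (hperm.trans (hY.append_right gs)).trans hmid.symm

-- Summing the three largest of the padded list equals summing A's folded triple.
theorem sorted_pad_sum (gs : List Int) (a b c : Int)
    (h : List.foldl fhcStep (0, 0, 0) gs = (a, b, c)) :
    ((PySem.List.sorted (gs ++ [0, 0, 0]) (fun x => x) true).take 3).sum = a + b + c := by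
  obtain ⟨a2, b2, c2, rest', heq, h1, h2, h3, hperm⟩ :=
    fhcStep_foldl_inv gs 0 0 0 [] le_rfl le_rfl (by simp)
  rw [h] at heq
  obtain ⟨rfl, rfl, rfl⟩ : a = a2 ∧ b = b2 ∧ c = c2 := by
    injection heq with e1 e2; injection e2 with e2 e3; exact ⟨e1, e2, e3⟩
  have hmem : ∀ y ∈ PySem.List.sorted rest' (fun x : Int => x) true, y ≤ c := by
    intro y hy
    exact h3 y ((PySem.List.mem_sorted rest' _ true y).mp hy)
  have hsorted : PySem.List.sorted (gs ++ [0, 0, 0]) (fun x => x) true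
      = a :: b :: c :: PySem.List.sorted rest' (fun x => x) true := by
    apply PySem.List.eq_of_perm_of_pairwise_le_of_injective (fun x : Int => -x) neg_injective
    · -- both sides are permutations of gs ++ [0,0,0]
      refine (PySem.List.sorted_perm _ _ _).trans ?_
      refine (List.perm_append_comm).trans ?_
      refine hperm.symm.trans ?_
      exact (((PySem.List.sorted_perm rest' (fun x : Int => x) true).symm.cons c).cons b).cons a
    · exact (PySem.List.sorted_pairwise_rev _ _).imp (fun {p q} hpq => neg_le_neg hpq)
    · -- a :: b :: c :: sorted rest' is descending
      refine List.Pairwise.cons ?_ (List.Pairwise.cons ?_ (List.Pairwise.cons ?_ ?_))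
      · intro y hy
        rcases List.mem_cons.mp hy with rfl | hy
        · exact neg_le_neg h1
        · rcases List.mem_cons.mp hy with rfl | hy
          · exact neg_le_neg (h2.trans h1)
          · exact neg_le_neg (((hmem y hy).trans h2).trans h1)
      · intro y hy
        rcases List.mem_cons.mp hy with rfl | hy
        · exact neg_le_neg h2
        · exact neg_le_neg ((hmem y hy).trans h2)
      · intro y hy
        exact neg_le_neg (hmem y hy)
      · exact (PySem.List.sorted_pairwise_rev _ _).imp (fun {p q} hpq => neg_le_neg hpq)
  rw [hsorted]
  simp [List.take]
  ring

-- ===== VERDICT (by name: the statement is the Claim_ definition above) =====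
theorem find_highest_calories_count_spec : Claim_equal_find_highest_calories_count := by
  intro calories _
  show find_highest_calories_count calories = find_highest_calories_count_alt calories
  obtain ⟨⟨a, b, c⟩, h⟩ : ∃ t, List.foldl fhcStep (0, 0, 0) (fhcB_groups calories 0) = t :=
    ⟨_, rfl⟩
  have hA : find_highest_calories_count calories = fhcA_go calories 0 (0, 0, 0) :=
    foldA_eq (calories.length : Int) calories 0 0 (0, 0, 0) (by omega)
  have hB : find_highest_calories_count_alt calories
      = ((PySem.List.sorted (fhcB_groups calories 0 ++ [0, 0, 0]) (fun x => x) true).take 3).sum := by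
    show ((PySem.List.sorted (((PySem.List.enumerate calories 0).foldl _ (0, [])).2 ++ [0, 0, 0]) (fun x => x) true).take 3).sum = _
    rw [foldB_eq (calories.length : Int) calories 0 0 [] (by omega)]
    rfl
  rw [hA, hB, fhcA_go_eq_foldl, h, sorted_pad_sum _ a b c h]
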